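-- pv_equiv track=rewrite | github.com/Afeks214/Lorenzian-Educlidian- | tests/performance/test_execution_profiler.py | _prioritize_optimizations
-- ===== SOURCE A (Python) =====
-- from typing import Dict, List, Any, Optional, Callable, Tuple
--
-- def _prioritize_optimizations(bottlenecks: List[Dict[str, Any]]) -> List[str]:
--     """Prioritize optimization recommendations"""
--     priorities = []
--
--     # Critical issues first
--     critical_bottlenecks = [b for b in bottlenecks if b.get('severity') == 'critical']
--     if critical_bottlenecks:
--         priorities.append("Address critical bottlenecks immediately")
--
--     # High-impact issues
--     high_bottlenecks = [b for b in bottlenecks if b.get('severity') == 'high']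
--     if high_bottlenecks:
--         priorities.append("Optimize high-impact bottlenecks")
--
--     # Pattern-based recommendations
--     cpu_issues = [b for b in bottlenecks if 'cpu' in b.get('description', '').lower()]
--     memory_issues = [b for b in bottlenecks if 'memory' in b.get('description', '').lower()]
--
--     if len(cpu_issues) > len(memory_issues):
--         priorities.append("Focus on CPU optimization")
--     elif len(memory_issues) > len(cpu_issues):
--         priorities.append("Focus on memory optimization")
--
--     return priorities
-- ===== SOURCE B (Python) =====
-- from typing import Dict, List, Any
--
-- def _prioritize_optimizations(bottlenecks: List[Dict[str, Any]]) -> List[str]: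
--     """Single pass: maintain two flags and two counters, then emit priorities."""
--     has_critical = False
--     has_high = False
--     cpu_count = 0
--     memory_count = 0
--     for b in bottlenecks:
--         sev = b.get('severity')
--         if sev == 'critical':
--             has_critical = True
--         if sev == 'high':
--             has_high = True
--         desc = b.get('description', '').lower()
--         if 'cpu' in desc:
--             cpu_count += 1
--         if 'memory' in desc:
--             memory_count += 1
--     priorities = []
--     if has_critical:
--         priorities.append("Address critical bottlenecks immediately")
--     if has_high:
--         priorities.append("Optimize high-impact bottlenecks")
--     if cpu_count > memory_count:
--         priorities.append("Focus on CPU optimization")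
--     elif memory_count > cpu_count:
--         priorities.append("Focus on memory optimization")
--     return priorities
-- ===== Notes on version B (the rewrite author's own statement) =====
-- stated objective: alternative
-- what changed: Replaces A's four independent filtering scans (two severity filters, two description-substring filters, each building an intermediate list) with one loop over the bottlenecks that maintains two booleans and two integer counters, then emits the same four priority strings from that state.
import Mathlib
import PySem

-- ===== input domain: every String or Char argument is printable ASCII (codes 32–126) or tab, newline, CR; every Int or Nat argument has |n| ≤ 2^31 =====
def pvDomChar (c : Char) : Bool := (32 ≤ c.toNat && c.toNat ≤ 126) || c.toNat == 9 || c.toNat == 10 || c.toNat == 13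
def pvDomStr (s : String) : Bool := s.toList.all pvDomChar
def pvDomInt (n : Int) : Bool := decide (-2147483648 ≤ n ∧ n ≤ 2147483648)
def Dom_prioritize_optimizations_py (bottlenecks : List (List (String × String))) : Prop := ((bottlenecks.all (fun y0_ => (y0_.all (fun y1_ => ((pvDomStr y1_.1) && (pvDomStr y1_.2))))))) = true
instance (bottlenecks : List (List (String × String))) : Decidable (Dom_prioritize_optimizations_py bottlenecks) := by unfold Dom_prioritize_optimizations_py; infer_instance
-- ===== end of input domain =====

-- B replaces A's four independent filtering scans with one loop maintaining two flags and two counters (alternative decomposition, same cost class).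

-- ===== PORT A =====
def prioritize_optimizations_py (bottlenecks : List (List (String × String))) : List String :=
  let priorities : List String := []
  let critical_bottlenecks := bottlenecks.filter
    (fun b => (PySem.Dict.mk b).get? "severity" == some "critical")
  let priorities := if critical_bottlenecks ≠ [] then priorities ++ ["Address critical bottlenecks immediately"] else priorities
  let high_bottlenecks := bottlenecks.filter
    (fun b => (PySem.Dict.mk b).get? "severity" == some "high")
  let priorities := if high_bottlenecks ≠ [] then priorities ++ ["Optimize high-impact bottlenecks"] else priorities
  let cpu_issues := bottlenecks.filter
    (fun b => PySem.Str.isIn "cpu" (PySem.Str.lower ((PySem.Dict.mk b).getD "description" "")))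
  let memory_issues := bottlenecks.filter
    (fun b => PySem.Str.isIn "memory" (PySem.Str.lower ((PySem.Dict.mk b).getD "description" "")))
  let priorities :=
    if cpu_issues.length > memory_issues.length then priorities ++ ["Focus on CPU optimization"]
    else if memory_issues.length > cpu_issues.length then priorities ++ ["Focus on memory optimization"]
    else priorities
  priorities

-- ===== PORT B =====
-- one step of B's loop over the state (has_critical, has_high, cpu_count, memory_count)
def pvStepB (st : Bool × Bool × Int × Int) (b : List (String × String)) : Bool × Bool × Int × Int :=
  let sev := (PySem.Dict.mk b).get? "severity"
  let hc := if sev == some "critical" then true else st.1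
  let hh := if sev == some "high" then true else st.2.1
  let desc := PySem.Str.lower ((PySem.Dict.mk b).getD "description" "")
  let cc := if PySem.Str.isIn "cpu" desc then st.2.2.1 + 1 else st.2.2.1
  let mc := if PySem.Str.isIn "memory" desc then st.2.2.2 + 1 else st.2.2.2
  (hc, hh, cc, mc)

def prioritize_optimizations_py_alt (bottlenecks : List (List (String × String))) : List String :=
  let st := bottlenecks.foldl pvStepB (false, false, 0, 0)
  let priorities : List String := []
  let priorities := if st.1 then priorities ++ ["Address critical bottlenecks immediately"] else priorities
  let priorities := if st.2.1 then priorities ++ ["Optimize high-impact bottlenecks"] else priorities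
  let priorities :=
    if st.2.2.1 > st.2.2.2 then priorities ++ ["Focus on CPU optimization"]
    else if st.2.2.2 > st.2.2.1 then priorities ++ ["Focus on memory optimization"]
    else priorities
  priorities

-- ===== PRECONDITION & SPEC =====
def Spec_prioritize_optimizations_py (bottlenecks : List (List (String × String))) (out : List String) : Prop := out = prioritize_optimizations_py_alt bottlenecks
instance (bottlenecks : List (List (String × String))) (out : List String) : Decidable (Spec_prioritize_optimizations_py bottlenecks out) := by unfold Spec_prioritize_optimizations_py; infer_instance

-- ===== CLAIM (what is proved, stated in full; the proofs are below) =====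
def Claim_equal_prioritize_optimizations_py : Prop := ∀ (bottlenecks : List (List (String × String))), Dom_prioritize_optimizations_py bottlenecks → Spec_prioritize_optimizations_py bottlenecks (prioritize_optimizations_py bottlenecks)

-- ===== LEMMAS AND PROOFS =====

-- B's fold computes exactly the any/countP summary of the four predicates A filters by
set_option maxHeartbeats 1600000 in
theorem pvFoldB_char (l : List (List (String × String))) (hc hh : Bool) (cc mc : Int) :
    l.foldl pvStepB (hc, hh, cc, mc)
      = (hc || l.any (fun b => (PySem.Dict.mk b).get? "severity" == some "critical"),
         hh || l.any (fun b => (PySem.Dict.mk b).get? "severity" == some "high"),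
         cc + (l.countP (fun b => PySem.Str.isIn "cpu" (PySem.Str.lower ((PySem.Dict.mk b).getD "description" ""))) : Int),
         mc + (l.countP (fun b => PySem.Str.isIn "memory" (PySem.Str.lower ((PySem.Dict.mk b).getD "description" ""))) : Int)) := by
  induction l generalizing hc hh cc mc with
  | nil => simp
  | cons b t ih =>
    rw [List.foldl_cons, pvStepB, ih]
    simp only [List.any_cons, List.countP_cons]
    cases h1 : ((PySem.Dict.mk b).get? "severity" == some "critical") <;>
    cases h2 : ((PySem.Dict.mk b).get? "severity" == some "high") <;>
    cases h3 : (PySem.Str.isIn "cpu" (PySem.Str.lower ((PySem.Dict.mk b).getD "description" ""))) <;>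
    cases h4 : (PySem.Str.isIn "memory" (PySem.Str.lower ((PySem.Dict.mk b).getD "description" ""))) <;>
    simp [Prod.ext_iff] <;> omega

theorem pvFilterNeNil {α : Type} (l : List α) (p : α → Bool) :
    (l.filter p ≠ []) ↔ l.any p = true := by
  rw [← List.isEmpty_eq_false_iff, List.isEmpty_eq_false_iff_exists_mem]
  simp [List.any_eq_true, List.mem_filter]

-- ===== VERDICT (by name: the statement is the Claim_ definition above) =====
theorem prioritize_optimizations_py_spec : Claim_equal_prioritize_optimizations_py := by
  intro bs _
  unfold Spec_prioritize_optimizations_py prioritize_optimizations_py prioritize_optimizations_py_alt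
  rw [pvFoldB_char]
  simp only [Bool.false_or, Int.zero_add, gt_iff_lt, Nat.cast_lt,
    pvFilterNeNil bs (fun b => (PySem.Dict.mk b).get? "severity" == some "critical"),
    pvFilterNeNil bs (fun b => (PySem.Dict.mk b).get? "severity" == some "high"),
    ← List.countP_eq_length_filter]
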